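-- pv_equiv track=rewrite | github.com/JaeBumPark/- | sk/c1.class.py | can_take_class
-- ===== SOURCE A (Python) =====
-- def can_take_class(mandatory, elective):
--     answer = 0
--     elective.sort(key=lambda x: x[4])  # 선택 강의를 강의 평가 순위를 기준으로 정렬
--
--     for e in elective:
--         e_day, e_start, e_duration, e_building, e_rank = e
--         conflict = False  # 선택 강의와 필수 강의의 시간이 겹치는지 여부를 나타내는 변수
--
--         for m in mandatory:
--             m_day, m_start, m_duration, m_building = m
--
--             # 1번 조건: 선택 강의와 필수 강의 시간이 겹치면 안됨
--             if e_day == m_day and e_building == m_building: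
--                 if (e_start >= m_start and e_start < m_start + m_duration) or \
--                    (m_start >= e_start and m_start < e_start + e_duration):
--                     conflict = True
--                     break
--
--         # 2번 조건: 선택 강의는 필수 강의 시간이 붙어있으면 안됨 (단, 건물이 같은 경우에는 가능)
--         if not conflict:
--             for m in mandatory:
--                 m_day, m_start, m_duration, m_building = m
--                 if e_day == m_day and abs(e_start + e_duration - m_start) <= 1 and e_building != m_building:
--                     conflict = True
--                     break
--
--         # 3번 조건: 필수 강의가 연리는 요일의 강의만을 수강할 수 있음
--         if not conflict and e_day not in [m[0] for m in mandatory]: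
--             conflict = True
--
--         # 4번 조건: 강의 평가 순위가 가장 낮은(강의 평가 순위값이 가장 작은) 강의를 신청
--         if not conflict:
--             answer += 1
--
--     # 수강할 수 있는 강의가 없으면 -1을 반환
--     if answer == 0:
--         return -1
--
--     return answer
-- ===== SOURCE B (Python) =====
-- def can_take_class(mandatory, elective):
--     elective.sort(key=lambda x: x[4])  # kept: preserves A's in-place mutation of elective
--     by_day = {}
--     for m_day, m_start, m_duration, m_building in mandatory:
--         by_day.setdefault(m_day, []).append((m_start, m_duration, m_building))
--     answer = 0
--     for e_day, e_start, e_duration, e_building, _rank in elective: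
--         entries = by_day.get(e_day)
--         if entries is None:
--             continue  # no mandatory class that day -> elective cannot be taken
--         ok = True
--         for m_start, m_duration, m_building in entries:
--             if e_building == m_building:
--                 if (e_start >= m_start and e_start < m_start + m_duration) or \
--                    (m_start >= e_start and m_start < e_start + e_duration):
--                     ok = False
--                     break
--             elif abs(e_start + e_duration - m_start) <= 1:
--                 ok = False
--                 break
--         if ok:
--             answer += 1
--     return answer if answer else -1
-- ===== Notes on version B (the rewrite author's own statement) =====
-- stated objective: faster
-- what changed: B builds a day-indexed dict of mandatory entries once and replaces A's three per-elective scans of the whole mandatory list (overlap scan, adjacency scan, day-membership scan) by one dict lookup plus a single pass over that day's entries.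
import Mathlib
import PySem

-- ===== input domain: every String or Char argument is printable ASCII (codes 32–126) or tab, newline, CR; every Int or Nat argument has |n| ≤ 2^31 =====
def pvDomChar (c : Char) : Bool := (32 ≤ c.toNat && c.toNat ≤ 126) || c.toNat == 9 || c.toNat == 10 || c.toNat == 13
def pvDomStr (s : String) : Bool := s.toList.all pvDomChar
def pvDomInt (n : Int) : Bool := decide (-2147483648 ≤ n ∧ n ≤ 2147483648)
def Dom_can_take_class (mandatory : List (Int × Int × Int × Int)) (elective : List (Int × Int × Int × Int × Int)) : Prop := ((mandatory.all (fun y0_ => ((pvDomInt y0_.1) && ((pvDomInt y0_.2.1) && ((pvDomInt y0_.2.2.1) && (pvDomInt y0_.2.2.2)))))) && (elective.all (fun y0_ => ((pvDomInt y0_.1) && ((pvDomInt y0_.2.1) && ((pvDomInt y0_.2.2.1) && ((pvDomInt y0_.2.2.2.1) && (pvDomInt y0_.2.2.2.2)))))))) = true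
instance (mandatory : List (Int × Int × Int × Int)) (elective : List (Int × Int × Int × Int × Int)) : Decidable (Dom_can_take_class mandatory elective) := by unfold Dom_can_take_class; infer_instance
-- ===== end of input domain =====

-- B replaces A's three separate scans of `mandatory` per elective by a day-indexed dict built
-- once, then a single pass over that day's entries per elective (objective: faster on many-day
-- inputs; return value only — both A and B sort `elective` in place by rank, which a caller can observe).


-- ===== PORT A =====
-- A's per-elective body: first loop (overlap, same building, break = List.any), second loop
-- (adjacency, different building), then the day-membership check, then the conditional increment.
def pvStepA (mandatory : List (Int × Int × Int × Int)) (answer : Int) (e : Int × Int × Int × Int × Int) : Int :=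
  let conflict := mandatory.any (fun m =>
    decide (e.1 = m.1 ∧ e.2.2.2.1 = m.2.2.2 ∧
      ((e.2.1 ≥ m.2.1 ∧ e.2.1 < m.2.1 + m.2.2.1) ∨ (m.2.1 ≥ e.2.1 ∧ m.2.1 < e.2.1 + e.2.2.1))))
  let conflict := if !conflict then
      mandatory.any (fun m =>
        decide (e.1 = m.1 ∧ |e.2.1 + e.2.2.1 - m.2.1| ≤ 1 ∧ e.2.2.2.1 ≠ m.2.2.2))
    else conflict
  let conflict := if !conflict && !((mandatory.map (fun m => m.1)).contains e.1) then true else conflict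
  if !conflict then answer + 1 else answer

def can_take_class (mandatory : List (Int × Int × Int × Int)) (elective : List (Int × Int × Int × Int × Int)) : Int :=
  let el := PySem.List.sorted elective (fun x => x.2.2.2.2) false
  let answer := el.foldl (pvStepA mandatory) 0
  if answer = 0 then -1 else answer

-- ===== PORT B =====
-- B's inner-loop test on one (start, duration, building) entry of the elective's day
def pvEntryConflict (es edu eb : Int) (p : Int × Int × Int) : Bool :=
  if eb = p.2.2 then
    decide ((es ≥ p.1 ∧ es < p.1 + p.2.1) ∨ (p.1 ≥ es ∧ p.1 < es + edu))
  else
    decide (|es + edu - p.1| ≤ 1)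

-- by_day: setdefault(day, []).append(entry)  =  modify day [] (· ++ [entry])
def pvBuildByDay (mandatory : List (Int × Int × Int × Int)) : PySem.Dict Int (List (Int × Int × Int)) :=
  mandatory.foldl (fun d m => d.modify m.1 [] (fun l => l ++ [(m.2.1, m.2.2.1, m.2.2.2)])) PySem.Dict.empty

def pvStepB (d : PySem.Dict Int (List (Int × Int × Int))) (answer : Int) (e : Int × Int × Int × Int × Int) : Int :=
  match d.get? e.1 with
  | none => answer
  | some entries =>
    if entries.any (pvEntryConflict e.2.1 e.2.2.1 e.2.2.2.1) then answer else answer + 1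

def can_take_class_alt (mandatory : List (Int × Int × Int × Int)) (elective : List (Int × Int × Int × Int × Int)) : Int :=
  let el := PySem.List.sorted elective (fun x => x.2.2.2.2) false
  let by_day := pvBuildByDay mandatory
  let answer := el.foldl (pvStepB by_day) 0
  if answer = 0 then -1 else answer

-- ===== PRECONDITION & SPEC =====
def Spec_can_take_class (mandatory : List (Int × Int × Int × Int)) (elective : List (Int × Int × Int × Int × Int)) (out : Int) : Prop := out = can_take_class_alt mandatory elective
instance (mandatory : List (Int × Int × Int × Int)) (elective : List (Int × Int × Int × Int × Int)) (out : Int) : Decidable (Spec_can_take_class mandatory elective out) := by unfold Spec_can_take_class; infer_instance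

-- ===== CLAIM (what is proved, stated in full; the proofs are below) =====
def Claim_equal_can_take_class : Prop := ∀ (mandatory : List (Int × Int × Int × Int)) (elective : List (Int × Int × Int × Int × Int)), Dom_can_take_class mandatory elective → Spec_can_take_class mandatory elective (can_take_class mandatory elective)

-- ===== LEMMAS AND PROOFS =====

lemma list_any_or {α : Type} (l : List α) (p q : α → Bool) :
    l.any (fun x => p x || q x) = (l.any p || l.any q) := by
  induction l with
  | nil => rfl
  | cons h t ih =>
    simp only [List.any_cons, ih]
    cases p h <;> cases q h <;> simp

-- the dict built by pvBuildByDay looked up at `day` is exactly the day-filtered projection of mandatory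
lemma buildByDay_getD (mandatory : List (Int × Int × Int × Int)) (day : Int) :
    (pvBuildByDay mandatory).getD day [] =
      (mandatory.filter (fun m => m.1 == day)).map (fun m => (m.2.1, m.2.2.1, m.2.2.2)) := by
  suffices h : ∀ (d : PySem.Dict Int (List (Int × Int × Int))),
      (mandatory.foldl (fun d m => d.modify m.1 [] (fun l => l ++ [(m.2.1, m.2.2.1, m.2.2.2)])) d).getD day []
        = d.getD day [] ++ (mandatory.filter (fun m => m.1 == day)).map (fun m => (m.2.1, m.2.2.1, m.2.2.2)) by
    simpa [pvBuildByDay] using h PySem.Dict.empty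
  induction mandatory with
  | nil => intro d; simp
  | cons m ms ih =>
    intro d
    simp only [List.foldl_cons, List.filter_cons]
    by_cases hm : m.1 = day
    · simp [hm, ih]
    · have : (m.1 == day) = false := by simp [hm]
      simp [this, ih, PySem.Dict.getD_modify, Ne.symm hm]

lemma buildByDay_contains (mandatory : List (Int × Int × Int × Int)) (day : Int) :
    (pvBuildByDay mandatory).contains day = mandatory.any (fun m => m.1 == day) := by
  suffices h : ∀ (d : PySem.Dict Int (List (Int × Int × Int))),
      (mandatory.foldl (fun d m => d.modify m.1 [] (fun l => l ++ [(m.2.1, m.2.2.1, m.2.2.2)])) d).contains day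
        = (d.contains day || mandatory.any (fun m => m.1 == day)) by
    simpa [pvBuildByDay] using h PySem.Dict.empty
  induction mandatory with
  | nil => intro d; simp
  | cons m ms ih =>
    intro d
    simp only [List.foldl_cons, List.any_cons]
    rw [ih, PySem.Dict.contains_modify]
    cases hd : d.contains day <;> cases hm : (day == m.1) <;>
      simp_all [BEq.comm (a := m.1)]

-- A's let-chain over the three conflict flags, with the scan results generalized to Booleans
lemma stepA_cases (b1 b2 b3 : Bool) (acc : Int) :
    (let c := b1;
     let c := if !c then b2 else c;
     let c := if !c && !b3 then true else c;
     if !c then acc + 1 else acc) = if !b1 && !b2 && b3 then acc + 1 else acc := by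
  cases b1 <;> cases b2 <;> cases b3 <;> rfl

-- per-elective: A's three scans decide exactly what B's dict lookup + single pass decides
lemma step_eq (mandatory : List (Int × Int × Int × Int)) (acc : Int) (e : Int × Int × Int × Int × Int) :
    pvStepA mandatory acc e = pvStepB (pvBuildByDay mandatory) acc e := by
  have hA : pvStepA mandatory acc e =
      if (!mandatory.any (fun m =>
            decide (e.1 = m.1 ∧ e.2.2.2.1 = m.2.2.2 ∧
              ((e.2.1 ≥ m.2.1 ∧ e.2.1 < m.2.1 + m.2.2.1) ∨ (m.2.1 ≥ e.2.1 ∧ m.2.1 < e.2.1 + e.2.2.1)))) &&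
          !mandatory.any (fun m =>
            decide (e.1 = m.1 ∧ |e.2.1 + e.2.2.1 - m.2.1| ≤ 1 ∧ e.2.2.2.1 ≠ m.2.2.2)) &&
          (mandatory.map (fun m => m.1)).contains e.1)
      then acc + 1 else acc := by
    unfold pvStepA; exact stepA_cases _ _ _ acc
  rw [hA]
  cases hg : (pvBuildByDay mandatory).get? e.1 with
  | none =>
    -- no mandatory class on this day: the day-membership test fails on both sides
    have hc : (pvBuildByDay mandatory).contains e.1 = false := by
      rw [PySem.Dict.contains_eq_isSome_get?, hg]; rfl
    have hday : mandatory.any (fun m => m.1 == e.1) = false := by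
      rw [← buildByDay_contains, hc]
    have h3 : ((mandatory.map (fun m => m.1)).contains e.1) = false := by
      rw [List.contains_map]; simpa [BEq.comm] using hday
    have hB : pvStepB (pvBuildByDay mandatory) acc e = acc := by
      unfold pvStepB; rw [hg]
    rw [hB, h3]
    simp only [Bool.and_false, Bool.false_eq_true, if_false]
  | some entries =>
    have hc : (pvBuildByDay mandatory).contains e.1 = true := by
      rw [PySem.Dict.contains_eq_isSome_get?, hg]; rfl
    have hday : mandatory.any (fun m => m.1 == e.1) = true := by
      rw [← buildByDay_contains, hc]
    have hent : entries = (mandatory.filter (fun m => m.1 == e.1)).map (fun m => (m.2.1, m.2.2.1, m.2.2.2)) := by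
      rw [← buildByDay_getD, PySem.Dict.getD_eq_get?_getD, hg]; rfl
    have h3 : ((mandatory.map (fun m => m.1)).contains e.1) = true := by
      rw [List.contains_map]; simpa [BEq.comm] using hday
    -- B's single-pass test = A's first scan OR A's second scan
    have hany : entries.any (pvEntryConflict e.2.1 e.2.2.1 e.2.2.2.1) =
        (mandatory.any (fun m =>
          decide (e.1 = m.1 ∧ e.2.2.2.1 = m.2.2.2 ∧
            ((e.2.1 ≥ m.2.1 ∧ e.2.1 < m.2.1 + m.2.2.1) ∨ (m.2.1 ≥ e.2.1 ∧ m.2.1 < e.2.1 + e.2.2.1)))) ||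
         mandatory.any (fun m =>
          decide (e.1 = m.1 ∧ |e.2.1 + e.2.2.1 - m.2.1| ≤ 1 ∧ e.2.2.2.1 ≠ m.2.2.2))) := by
      rw [hent, List.any_map, List.any_filter, ← list_any_or]
      have hfun : (fun m : Int × Int × Int × Int =>
            (m.1 == e.1) && (pvEntryConflict e.2.1 e.2.2.1 e.2.2.2.1 ∘ fun m => (m.2.1, m.2.2.1, m.2.2.2)) m) =
          (fun m : Int × Int × Int × Int =>
            decide (e.1 = m.1 ∧ e.2.2.2.1 = m.2.2.2 ∧
              ((e.2.1 ≥ m.2.1 ∧ e.2.1 < m.2.1 + m.2.2.1) ∨ (m.2.1 ≥ e.2.1 ∧ m.2.1 < e.2.1 + e.2.2.1))) ||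
            decide (e.1 = m.1 ∧ |e.2.1 + e.2.2.1 - m.2.1| ≤ 1 ∧ e.2.2.2.1 ≠ m.2.2.2)) := by
        funext m
        by_cases hd : m.1 = e.1
        · by_cases hb : e.2.2.2.1 = m.2.2.2 <;>
            simp [pvEntryConflict, Function.comp, hd, hb]
        · have hd' : ¬(e.1 = m.1) := fun h => hd h.symm
          simp [hd, hd']
      rw [hfun]
    have hB : pvStepB (pvBuildByDay mandatory) acc e =
        if entries.any (pvEntryConflict e.2.1 e.2.2.1 e.2.2.2.1) then acc else acc + 1 := by
      unfold pvStepB; rw [hg]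
    rw [hB, hany, h3]
    cases hA1 : mandatory.any (fun m =>
        decide (e.1 = m.1 ∧ e.2.2.2.1 = m.2.2.2 ∧
          ((e.2.1 ≥ m.2.1 ∧ e.2.1 < m.2.1 + m.2.2.1) ∨ (m.2.1 ≥ e.2.1 ∧ m.2.1 < e.2.1 + e.2.2.1)))) <;>
      cases hA2 : mandatory.any (fun m =>
        decide (e.1 = m.1 ∧ |e.2.1 + e.2.2.1 - m.2.1| ≤ 1 ∧ e.2.2.2.1 ≠ m.2.2.2)) <;>
      rfl

-- ===== VERDICT (by name: the statement is the Claim_ definition above) =====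
theorem can_take_class_spec : Claim_equal_can_take_class := by
  intro mandatory elective _
  unfold Spec_can_take_class can_take_class can_take_class_alt
  have : (PySem.List.sorted elective (fun x => x.2.2.2.2) false).foldl (pvStepA mandatory) 0
       = (PySem.List.sorted elective (fun x => x.2.2.2.2) false).foldl (pvStepB (pvBuildByDay mandatory)) 0 :=
    List.foldl_ext _ _ 0 (fun acc e _ => step_eq mandatory acc e)
  simp only [this]
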